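-- pv_equiv track=rewrite | github.com/robsdedude/flake8-picky-parentheses | flake8_redundant_parentheses/__init__.py | _last_in_line
-- ===== SOURCE A (Python) =====
-- def _last_in_line(cords, source_code):
--     for symb in reversed(source_code[cords[0] - 1]):
--         if symb == " " or symb == ":" or symb == "\n":
--             continue
--         elif symb == ")" or symb == "(" or symb == "]" or symb == "[" or symb == "}" or symb == "{":
--             return True
--         else:
--             return False
-- ===== SOURCE B (Python) =====
-- def _last_in_line(cords, source_code):
--     result = None
--     for symb in source_code[cords[0] - 1]:
--         if symb not in " :\n":
--             result = symb in "()[]{}"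
--     return result
-- ===== Notes on version B (the rewrite author's own statement) =====
-- stated objective: alternative
-- what changed: Replaces A's reversed scan with early return by a forward single pass over the line that keeps an accumulator overwritten at each non-trivial character, so the final accumulator is the verdict of the last non-trivial character.
import Mathlib
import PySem

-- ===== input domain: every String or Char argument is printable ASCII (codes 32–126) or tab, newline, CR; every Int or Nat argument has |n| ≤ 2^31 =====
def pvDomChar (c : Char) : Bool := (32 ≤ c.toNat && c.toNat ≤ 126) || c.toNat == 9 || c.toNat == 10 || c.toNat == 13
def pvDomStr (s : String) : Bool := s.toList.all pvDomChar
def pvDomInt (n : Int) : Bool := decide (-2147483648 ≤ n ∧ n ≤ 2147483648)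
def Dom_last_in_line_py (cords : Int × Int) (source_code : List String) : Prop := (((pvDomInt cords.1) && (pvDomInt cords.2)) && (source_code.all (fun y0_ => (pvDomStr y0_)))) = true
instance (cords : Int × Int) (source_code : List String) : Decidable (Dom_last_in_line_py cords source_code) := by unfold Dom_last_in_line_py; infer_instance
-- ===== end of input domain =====

-- B replaces A's reversed scan + early return by a forward single pass with an overwritten accumulator (objective: alternative).


-- ===== PORT A =====
-- A's reverse loop: walk the reversed character list, skip ' ', ':', '\n';
-- first other character decides True (bracket) / False; fall-through = None.
def aScan : List Char → Option Bool
  | [] => none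
  | c :: rest =>
    if c = ' ' ∨ c = ':' ∨ c = '\n' then aScan rest
    else if c = ')' ∨ c = '(' ∨ c = ']' ∨ c = '[' ∨ c = '}' ∨ c = '{' then some true
    else some false

def last_in_line_py (cords : Int × Int) (source_code : List String) : Option Bool :=
  match PySem.List.pyGet? source_code (cords.1 - 1) with
  | none => none   -- IndexError in Python; excluded by Pre_
  | some line => aScan line.toList.reverse

-- ===== PORT B =====
-- B's forward loop body: overwrite the accumulator at each non-trivial character
def bStep (acc : Option Bool) (c : Char) : Option Bool :=
  if ¬ ((" :\n".toList).contains c) then some (("()[]{}".toList).contains c) else acc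

def last_in_line_py_alt (cords : Int × Int) (source_code : List String) : Option Bool :=
  match PySem.List.pyGet? source_code (cords.1 - 1) with
  | none => none   -- IndexError in Python; excluded by Pre_
  | some line => line.toList.foldl bStep none

-- ===== PRECONDITION & SPEC =====
-- Pre_ excludes exactly the inputs where source_code[cords[0]-1] raises IndexError.
def Pre_last_in_line_py (cords : Int × Int) (source_code : List String) : Prop :=
  PySem.Raise.InRange source_code.length (cords.1 - 1)
instance (cords : Int × Int) (source_code : List String) : Decidable (Pre_last_in_line_py cords source_code) := by unfold Pre_last_in_line_py; infer_instance

def pvWitness_last_in_line_py : (Int × Int) × List String := ((1, 0), ["x) :"])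

def Spec_last_in_line_py (cords : Int × Int) (source_code : List String) (out : Option Bool) : Prop := out = last_in_line_py_alt cords source_code
instance (cords : Int × Int) (source_code : List String) (out : Option Bool) : Decidable (Spec_last_in_line_py cords source_code out) := by unfold Spec_last_in_line_py; infer_instance

-- ===== CLAIM (what is proved, stated in full; the proofs are below) =====
def Claim_equal_last_in_line_py : Prop := ∀ (cords : Int × Int) (source_code : List String), Dom_last_in_line_py cords source_code → Pre_last_in_line_py cords source_code → Spec_last_in_line_py cords source_code (last_in_line_py cords source_code)

-- ===== LEMMAS AND PROOFS =====
lemma triv_toList : " :\n".toList = [' ', ':', '\n'] := rfl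
lemma brk_toList : "()[]{}".toList = ['(', ')', '[', ']', '{', '}'] := rfl

lemma bStep_eq (acc : Option Bool) (c : Char) :
    bStep acc c =
      if c = ' ' ∨ c = ':' ∨ c = '\n' then acc
      else some (decide (c = ')' ∨ c = '(' ∨ c = ']' ∨ c = '[' ∨ c = '}' ∨ c = '{')) := by
  unfold bStep
  rw [triv_toList, brk_toList]
  simp only [List.contains_eq_mem, List.mem_cons, List.not_mem_nil, or_false,
    decide_eq_true_eq]
  by_cases ht : c = ' ' ∨ c = ':' ∨ c = '\n'
  · simp [ht]
  · simp only [ht, not_false_eq_true, if_pos, if_false]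
    congr 1
    simp only [decide_eq_decide]
    tauto

-- forward fold = reverse scan, unless the line has no non-trivial char (then acc)
lemma fold_eq_aScan (l : List Char) (acc : Option Bool) :
    l.foldl bStep acc = match aScan l.reverse with
      | none => acc
      | some b => some b := by
  induction l using List.reverseRecOn generalizing acc with
  | nil => rfl
  | append_singleton l' c ih =>
    rw [List.foldl_append, List.reverse_append]
    simp only [List.foldl_cons, List.foldl_nil, List.reverse_cons]
    show bStep (l'.foldl bStep acc) c =
      match aScan (c :: l'.reverse) with | none => acc | some b => some b
    rw [bStep_eq]
    by_cases ht : c = ' ' ∨ c = ':' ∨ c = '\n'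
    · rw [if_pos ht]
      show l'.foldl bStep acc = _
      rw [ih acc, aScan, if_pos ht]
    · rw [if_neg ht, aScan, if_neg ht]
      split_ifs with hb <;> simp [hb]

-- ===== VERDICT (by name: the statement is the Claim_ definition above) =====
theorem last_in_line_py_spec : Claim_equal_last_in_line_py := by
  intro cords source_code _ _
  unfold Spec_last_in_line_py last_in_line_py last_in_line_py_alt
  cases h : PySem.List.pyGet? source_code (cords.1 - 1) with
  | none => rfl
  | some line =>
    show aScan line.toList.reverse = line.toList.foldl bStep none
    rw [fold_eq_aScan]
    cases aScan line.toList.reverse <;> rfl
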